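-- pv_equiv track=rewrite | github.com/BearFishSheep/test | Sum of numbers from 0 to N.py | show_sequence
-- ===== SOURCE A (Python) =====
-- def show_sequence(n):
-- 	s = ''
-- 	if n < 0:
-- 		s = s + str(n) + '<0'
-- 	elif n == 0:
-- 		s = '0=0'
-- 	else:
-- 		sum = 0
-- 		ls = []
-- 		for i in range(n+1):
-- 			sum += i
-- 			ls.append(str(i))
-- 		s = '+'.join(ls)
-- 		s = s + ' = ' + str(sum)
-- 	return s
-- ===== SOURCE B (Python) =====
-- def show_sequence(n):
--     if n < 0:
--         return str(n) + '<0'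
--     if n == 0:
--         return '0=0'
--     total = n * (n + 1) // 2
--     return '+'.join(str(i) for i in range(n + 1)) + ' = ' + str(total)
-- ===== Notes on version B (the rewrite author's own statement) =====
-- stated objective: simpler
-- what changed: Replaces A's single loop that simultaneously accumulates the running sum and appends each number's string to a list by the closed-form Gauss sum plus a one-shot join over the range.
import Mathlib
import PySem

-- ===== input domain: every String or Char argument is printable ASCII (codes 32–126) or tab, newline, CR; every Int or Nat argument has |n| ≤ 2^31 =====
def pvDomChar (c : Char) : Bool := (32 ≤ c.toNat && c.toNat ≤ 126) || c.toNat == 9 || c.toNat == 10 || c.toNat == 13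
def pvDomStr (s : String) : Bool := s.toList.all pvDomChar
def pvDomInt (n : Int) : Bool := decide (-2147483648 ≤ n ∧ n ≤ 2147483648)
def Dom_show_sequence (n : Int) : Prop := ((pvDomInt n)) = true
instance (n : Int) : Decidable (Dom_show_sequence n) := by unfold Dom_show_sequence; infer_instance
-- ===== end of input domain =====

-- B replaces A's fused sum-and-append loop by the closed form n*(n+1)//2 and a one-shot join (objective: simpler).

-- ===== PORT A =====
def show_sequence (n : Int) : String :=
  if n < 0 then
    "" ++ PySem.Int.toStr n ++ "<0"
  else if n = 0 then
    "0=0"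
  else
    -- for i in range(n+1): sum += i; ls.append(str(i))
    let p := (PySem.List.pyRange 0 (n + 1) 1).foldl
      (fun (st : Int × List String) i => (st.1 + i, st.2 ++ [PySem.Int.toStr i])) (0, [])
    PySem.Str.join "+" p.2 ++ " = " ++ PySem.Int.toStr p.1

-- ===== PORT B =====
def show_sequence_alt (n : Int) : String :=
  if n < 0 then
    PySem.Int.toStr n ++ "<0"
  else if n = 0 then
    "0=0"
  else
    let total := PySem.Int.floordiv (n * (n + 1)) 2
    PySem.Str.join "+" ((PySem.List.pyRange 0 (n + 1) 1).map PySem.Int.toStr) ++ " = " ++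
      PySem.Int.toStr total

-- ===== PRECONDITION & SPEC =====
def Spec_show_sequence (n : Int) (out : String) : Prop := out = show_sequence_alt n
instance (n : Int) (out : String) : Decidable (Spec_show_sequence n out) := by unfold Spec_show_sequence; infer_instance

-- ===== CLAIM (what is proved, stated in full; the proofs are below) =====
def Claim_equal_show_sequence : Prop := ∀ (n : Int), Dom_show_sequence n → Spec_show_sequence n (show_sequence n)

-- ===== LEMMAS AND PROOFS =====

-- Gauss: sum of 0..m-1
lemma gauss_sum (m : Nat) :
    ((List.range m).map (fun k : Nat => (0 : Int) + (k : Int))).sum = ((m : Int) * m - m) / 2 := by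
  induction m with
  | zero => simp
  | succ m ih =>
    rw [List.range_succ, List.map_append, List.sum_append, ih]
    simp only [List.map_cons, List.map_nil, List.sum_cons, List.sum_nil]
    have h2 : (2 : Int) ∣ (m : Int) * m - m := by
      rcases Int.even_or_odd (m : Int) with he | ho
      · obtain ⟨k, hk⟩ := he
        exact ⟨k * k + k * k - k, by rw [hk]; ring⟩
      · obtain ⟨k, hk⟩ := ho
        exact ⟨2 * k * k + k, by rw [hk]; ring⟩
    obtain ⟨q, hq⟩ := h2
    have e1 : ((m : Int) * m - m) / 2 = q := by omega
    have e2 : ((m : Int) + 1) * ((m : Int) + 1) - ((m : Int) + 1) = 2 * (q + m) := by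
      have h3 : ((m : Int) + 1) * ((m : Int) + 1) - ((m : Int) + 1)
          = ((m : Int) * m - m) + 2 * m := by ring
      omega
    push_cast
    rw [e1, e2]
    omega

-- the sum of range(n+1) is the Gauss closed form
lemma sum_pyRange_gauss (n : Int) (hn : 0 < n) :
    ((PySem.List.pyRange 0 (n + 1) 1).map id).sum = PySem.Int.floordiv (n * (n + 1)) 2 := by
  rw [PySem.Int.floordiv_eq_ediv_of_pos (by norm_num)]
  rw [PySem.List.pyRange_one]
  rw [List.map_map, Function.id_comp]
  rw [gauss_sum]
  have hm : (((n + 1 - 0).toNat : Int)) = n + 1 := by omega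
  rw [hm]
  ring_nf

lemma show_sequence_eq_alt (n : Int) : show_sequence n = show_sequence_alt n := by
  unfold show_sequence show_sequence_alt
  split_ifs with h1 h2
  · simp
  · rfl
  · have hn : 0 < n := by omega
    rw [PySem.List.foldl_prod_mk (f := fun acc (i : Int) => acc + i)
        (g := fun acc (i : Int) => acc ++ [PySem.Int.toStr i])]
    have hsum : List.foldl (fun (acc i : Int) => acc + i) 0 (PySem.List.pyRange 0 (n + 1) 1)
        = PySem.Int.floordiv (n * (n + 1)) 2 := by
      rw [show (fun (acc i : Int) => acc + i) = (fun (acc : Int) i => acc + id i) from rfl]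
      rw [PySem.List.foldl_add]
      rw [sum_pyRange_gauss n hn]
      ring
    rw [hsum, PySem.List.foldl_append_singleton_eq_map]
    simp

-- ===== VERDICT (by name: the statement is the Claim_ definition above) =====
theorem show_sequence_spec : Claim_equal_show_sequence := by
  intro n _
  exact show_sequence_eq_alt n
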